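-- pv_equiv track=rewrite | github.com/RIKEN-RCCS/OpenFold-for-Fugaku | preproc_fugaku/scripts/precompute_alignments_fugaku.py | get_unique_seqs
-- ===== SOURCE A (Python) =====
-- def get_unique_seqs(input_seq_chains):
--     """
--     Returns a set of unique sequences.
--
--     Args:
--         input_seq_chains:
--             A list of (seq., chain_name) tuples
--     Returns:
--         A list of (seq., [chain_name, ...]) tuples
--     """
--
--     input_chains = [x[1] for x in input_seq_chains]
--     assert len(input_chains) == len(set(input_chains)) # Chain IDs must be unique
--
--     s2c = {}
--     for seq, chain in input_seq_chains:
--         if seq not in s2c.keys():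
--             s2c[seq] = []
--
--         s2c[seq].append(chain)
--
--     for seq in s2c.keys():
--         s2c[seq] = list(sorted(s2c[seq]))
--
--     # items must be inter-process consistent as it is divided by processes
--     return list(sorted(s2c.items(), key=lambda x: x[0]))
-- ===== SOURCE B (Python) =====
-- from itertools import groupby
--
-- def get_unique_seqs(input_seq_chains):
--     """
--     Returns a set of unique sequences.
--
--     Args:
--         input_seq_chains:
--             A list of (seq., chain_name) tuples
--     Returns:
--         A list of (seq., [chain_name, ...]) tuples
--     """
--     input_chains = [x[1] for x in input_seq_chains]
--     assert len(input_chains) == len(set(input_chains)) # Chain IDs must be unique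
--
--     pairs = sorted(input_seq_chains, key=lambda x: (x[0], x[1]))
--     return [(seq, [chain for _, chain in grp])
--             for seq, grp in groupby(pairs, key=lambda x: x[0])]
-- ===== Notes on version B (the rewrite author's own statement) =====
-- stated objective: idiomatic
-- what changed: Replaces the dict-accumulate-then-sort-each-group-then-sort-items strategy by one sort of the pairs by (seq, chain) followed by a single linear itertools.groupby pass over consecutive equal sequences.
import Mathlib
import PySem

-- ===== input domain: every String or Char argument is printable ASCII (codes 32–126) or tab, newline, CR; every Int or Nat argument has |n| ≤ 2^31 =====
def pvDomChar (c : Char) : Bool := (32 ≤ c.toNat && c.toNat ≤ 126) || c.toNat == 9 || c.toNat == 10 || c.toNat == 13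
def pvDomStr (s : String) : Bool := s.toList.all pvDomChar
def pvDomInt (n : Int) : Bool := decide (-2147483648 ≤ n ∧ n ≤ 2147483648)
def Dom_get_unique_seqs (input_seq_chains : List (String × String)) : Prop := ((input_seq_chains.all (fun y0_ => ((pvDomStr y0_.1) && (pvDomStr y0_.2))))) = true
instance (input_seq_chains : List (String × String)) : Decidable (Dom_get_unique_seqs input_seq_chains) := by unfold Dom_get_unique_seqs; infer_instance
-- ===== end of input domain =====

-- B replaces A's dict-accumulate-then-sort-twice strategy by one sort of the pairs by (seq, chain)
-- followed by a single linear grouping pass over consecutive equal sequences (idiomatic itertools.groupby style).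

-- ===== PORT A =====
-- The Python first builds input_chains and asserts the chain names are pairwise distinct
-- (AssertionError otherwise — those inputs are excluded by Pre_get_unique_seqs); the assert
-- does not affect the returned value, so the port computes the value directly.
def get_unique_seqs (input_seq_chains : List (String × String)) : List (String × List String) :=
  -- for seq, chain in input_seq_chains: if seq not in s2c: s2c[seq] = []; s2c[seq].append(chain)
  let s2c : PySem.Dict String (List String) :=
    input_seq_chains.foldl
      (fun d p =>
        let d' := if d.contains p.1 then d else d.insert p.1 ([] : List String)
        d'.insert p.1 (d'.getD p.1 [] ++ [p.2]))
      PySem.Dict.empty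
  -- for seq in s2c.keys(): s2c[seq] = list(sorted(s2c[seq]))
  let s2c' :=
    s2c.keys.foldl
      (fun d k => d.insert k (PySem.List.sorted (d.getD k []) (fun c => c) false)) s2c
  -- return list(sorted(s2c.items(), key=lambda x: x[0]))
  PySem.List.sorted s2c'.items (fun x => x.1) false

-- ===== PORT B =====
-- hand port of itertools.groupby specialised to key = fst followed by listing each group's
-- second components: groups maximal runs of CONSECUTIVE pairs with equal first component.
def pvGroupRuns : List (String × String) → List (String × List String)
  | [] => []
  | (s, c) :: rest =>
    match pvGroupRuns rest with
    | (s', cs) :: gs => if s = s' then (s, c :: cs) :: gs else (s, [c]) :: (s', cs) :: gs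
    | [] => [(s, [c])]

def get_unique_seqs_alt (input_seq_chains : List (String × String)) : List (String × List String) :=
  -- pairs = sorted(input_seq_chains, key=lambda x: (x[0], x[1]))  (assert as in A; see Pre_)
  pvGroupRuns (PySem.List.sorted2 input_seq_chains (fun p => p.1) (fun p => p.2) false)

-- ===== PRECONDITION & SPEC =====
-- Pre_ excludes exactly the inputs on which A's (and B's) assert fails, i.e. the chain
-- names (second components) are not pairwise distinct: there Python raises AssertionError.
def Pre_get_unique_seqs (input_seq_chains : List (String × String)) : Prop :=
  (input_seq_chains.map Prod.snd).Nodup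
instance (input_seq_chains : List (String × String)) : Decidable (Pre_get_unique_seqs input_seq_chains) := by
  unfold Pre_get_unique_seqs; infer_instance

def pvWitness_get_unique_seqs : (List (String × String)) :=
  [("MKV", "B"), ("AA", "C"), ("MKV", "A")]

def Spec_get_unique_seqs (input_seq_chains : List (String × String)) (out : List (String × List String)) : Prop := out = get_unique_seqs_alt input_seq_chains
instance (input_seq_chains : List (String × String)) (out : List (String × List String)) : Decidable (Spec_get_unique_seqs input_seq_chains out) := by unfold Spec_get_unique_seqs; infer_instance

-- ===== CLAIM (what is proved, stated in full; the proofs are below) =====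
def Claim_equal_get_unique_seqs : Prop := ∀ (input_seq_chains : List (String × String)), Dom_get_unique_seqs input_seq_chains → Pre_get_unique_seqs input_seq_chains → Spec_get_unique_seqs input_seq_chains (get_unique_seqs input_seq_chains)

-- ===== LEMMAS AND PROOFS =====

-- Python's lexicographic "(x[0], x[1]) ≤ (y[0], y[1])" order on the pairs.
def pvLexLe (a b : String × String) : Prop := a.1 < b.1 ∨ (a.1 = b.1 ∧ a.2 ≤ b.2)

lemma pvLexLe_trans : ∀ {a b c : String × String}, pvLexLe a b → pvLexLe b c → pvLexLe a c := by
  rintro a b c (h | ⟨h, h2⟩) (h' | ⟨h', h2'⟩) <;> unfold pvLexLe <;>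
    first
      | exact Or.inl (lt_trans h h')
      | exact Or.inl (h' ▸ h)
      | exact Or.inl (h ▸ h')
      | exact Or.inr ⟨h.trans h', le_trans h2 h2'⟩

lemma pvInsertBy_pairwise {α : Type} (R : α → α → Prop) (lt : α → α → Bool)
    (hT : ∀ {a b c}, R a b → R b c → R a c)
    (h1 : ∀ a b, lt a b = true → R a b) (h2 : ∀ a b, lt a b = false → R b a)
    (x : α) : ∀ ys, List.Pairwise R ys → List.Pairwise R (PySem.List.insertBy lt x ys) := by
  intro ys
  induction ys with
  | nil => intro _; simp [PySem.List.insertBy]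
  | cons y ys ih =>
    intro hp
    rw [List.pairwise_cons] at hp
    by_cases h : lt x y = true
    · simp only [PySem.List.insertBy, h, if_true]
      refine List.Pairwise.cons ?_ (List.Pairwise.cons hp.1 hp.2)
      intro z hz
      rcases List.mem_cons.mp hz with rfl | hz
      · exact h1 _ _ h
      · exact hT (h1 _ _ h) (hp.1 z hz)
    · simp only [PySem.List.insertBy, h]
      refine List.Pairwise.cons ?_ (ih hp.2)
      intro z hz
      rcases (PySem.List.mem_insertBy lt x z ys).mp hz with rfl | hz
      · exact h2 _ _ (by simpa using h)
      · exact hp.1 z hz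

lemma pvSorted2_pairwise (xs : List (String × String)) :
    List.Pairwise pvLexLe
      (PySem.List.sorted2 xs (fun p => p.1) (fun p => p.2) false) := by
  unfold PySem.List.sorted2
  simp only [if_neg (by decide : ¬ (false = true))]
  have main : ∀ (l : List (String × String)) (acc : List (String × String)),
      List.Pairwise pvLexLe acc →
      List.Pairwise pvLexLe
        (l.foldl (fun acc x =>
          PySem.List.insertBy
            (fun a b => decide (a.1 < b.1) || (!decide (b.1 < a.1) && decide (a.2 < b.2))) x acc) acc) := by
    intro l
    induction l with
    | nil => intro acc h; simpa using h
    | cons x l ih =>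
      intro acc h
      simp only [List.foldl_cons]
      refine ih _ ?_
      refine pvInsertBy_pairwise pvLexLe _ (fun h h' => pvLexLe_trans h h') ?_ ?_ x acc h
      · intro a b hab
        simp only [Bool.or_eq_true, Bool.and_eq_true, Bool.not_eq_eq_eq_not, Bool.not_true,
          decide_eq_true_eq, decide_eq_false_iff_not] at hab
        rcases hab with h1 | ⟨h1, h2⟩
        · exact Or.inl h1
        · by_cases hlt : a.1 < b.1
          · exact Or.inl hlt
          · exact Or.inr ⟨le_antisymm (not_lt.mp h1) (not_lt.mp hlt), le_of_lt h2⟩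
      · intro a b hab
        simp only [Bool.or_eq_false_iff, Bool.and_eq_false_iff, Bool.not_eq_eq_eq_not,
          Bool.not_false, decide_eq_true_eq, decide_eq_false_iff_not] at hab
        rcases hab with ⟨h1, h2 | h2⟩
        · exact Or.inl h2
        · by_cases hlt : b.1 < a.1
          · exact Or.inl hlt
          · exact Or.inr ⟨le_antisymm (not_lt.mp h1) (not_lt.mp hlt), not_lt.mp h2⟩
  exact main xs [] List.Pairwise.nil

lemma pvGroupRuns_cons_shape (q : String × String) (t : List (String × String)) :
    ∃ cs gs, pvGroupRuns (q :: t) = (q.1, q.2 :: cs) :: gs := by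
  obtain ⟨s, c⟩ := q
  rcases hg : pvGroupRuns t with _ | ⟨⟨s', cs'⟩, gs⟩
  · exact ⟨[], [], by simp [pvGroupRuns, hg]⟩
  · by_cases h : s = s'
    · exact ⟨cs', gs, by simp [pvGroupRuns, hg, h]⟩
    · exact ⟨[], (s', cs') :: gs, by simp [pvGroupRuns, hg, h]⟩

lemma pvGroupRuns_cons (sc : String) (c : String) (rest : List (String × String)) :
    pvGroupRuns ((sc, c) :: rest)
      = match pvGroupRuns rest with
        | (s', cs) :: gs => if sc = s' then (sc, c :: cs) :: gs else (sc, [c]) :: (s', cs) :: gs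
        | [] => [(sc, [c])] := rfl

lemma pvGroupRuns_spec : ∀ ys : List (String × String), List.Pairwise pvLexLe ys →
    (List.Pairwise (fun (a b : String × List String) => a.1 < b.1) (pvGroupRuns ys))
    ∧ (∀ k, k ∈ (pvGroupRuns ys).map Prod.fst ↔ k ∈ ys.map Prod.fst)
    ∧ (∀ p ∈ pvGroupRuns ys, p.2 = (ys.filter (fun q => q.1 == p.1)).map Prod.snd) := by
  intro ys
  induction ys with
  | nil => intro _; refine ⟨by simp [pvGroupRuns], by simp [pvGroupRuns], by simp [pvGroupRuns]⟩
  | cons p t ih =>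
    obtain ⟨s, c⟩ := p
    intro hp
    rw [List.pairwise_cons] at hp
    obtain ⟨hhead, htail⟩ := hp
    cases t with
    | nil =>
      refine ⟨by simp [pvGroupRuns], by simp [pvGroupRuns], ?_⟩
      intro pr hpr
      simp [pvGroupRuns] at hpr
      subst hpr
      simp
    | cons q t' =>
      obtain ⟨IH1, IH2, IH3⟩ := ih htail
      obtain ⟨cs, gs, hshape⟩ := pvGroupRuns_cons_shape q t'
      rw [hshape] at IH1 IH2
      rw [List.pairwise_cons] at IH1
      obtain ⟨hq_gs, hgs⟩ := IH1
      have hq_le : ∀ r ∈ t', q.1 ≤ r.1 := by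
        intro r hr
        rcases (List.pairwise_cons.mp htail).1 r hr with h | ⟨h, _⟩
        · exact le_of_lt h
        · exact le_of_eq h
      by_cases hsq : s = q.1
      · subst hsq
        have hrun : pvGroupRuns ((q.1, c) :: q :: t') = (q.1, c :: q.2 :: cs) :: gs := by
          rw [pvGroupRuns_cons, hshape]; simp
        have hIH3h : q.2 :: cs = ((q :: t').filter (fun r => r.1 == q.1)).map Prod.snd := by
          simpa using IH3 (q.1, q.2 :: cs) (by rw [hshape]; exact List.mem_cons_self)
        rw [hrun]
        refine ⟨List.Pairwise.cons (fun b hb => hq_gs b hb) hgs, ?_, ?_⟩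
        · intro k
          have h2 := IH2 k
          simp only [List.map_cons, List.mem_cons] at h2 ⊢
          tauto
        · intro pr hpr
          rcases List.mem_cons.mp hpr with rfl | hpr
          · simpa using congrArg (List.cons c) hIH3h
          · have hklt : q.1 < pr.1 := hq_gs pr hpr
            have hv := IH3 pr (by rw [hshape]; exact List.mem_cons_of_mem _ hpr)
            rw [hv]
            simp only [List.filter_cons]
            have hne : ((q.1, c).1 == pr.1) = false := by
              simp only [beq_eq_false_iff_ne, ne_eq]
              exact ne_of_lt hklt
            simp only [hne, Bool.false_eq_true, if_false]
      · have hrun : pvGroupRuns ((s, c) :: q :: t') = (s, [c]) :: (q.1, q.2 :: cs) :: gs := by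
          rw [pvGroupRuns_cons, hshape]
          simp [hsq]
        have hlt : ∀ r ∈ q :: t', s < r.1 := by
          intro r hr
          rcases List.mem_cons.mp hr with rfl | hr
          · rcases hhead r List.mem_cons_self with h | ⟨h, _⟩
            · exact h
            · exact absurd h hsq
          · rcases hhead r (List.mem_cons_of_mem _ hr) with h | ⟨h, _⟩
            · exact h
            · -- s = r.1 is impossible: s < q.1 ≤ r.1
              have hsq' : s < q.1 := by
                rcases hhead q List.mem_cons_self with h' | ⟨h', _⟩
                · exact h'
                · exact absurd h' hsq
              exact absurd h (ne_of_lt (lt_of_lt_of_le hsq' (hq_le r hr)))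
        rw [hrun]
        refine ⟨?_, ?_, ?_⟩
        · refine List.Pairwise.cons ?_ (List.Pairwise.cons hq_gs hgs)
          intro b hb
          have : b.1 ∈ ((q.1, q.2 :: cs) :: gs).map Prod.fst := List.mem_map_of_mem hb
          rw [← hshape] at this
          have : b.1 ∈ (q :: t').map Prod.fst := (IH2 b.1).mp (hshape ▸ this)
          obtain ⟨r, hr, hrb⟩ := List.mem_map.mp this
          exact hrb ▸ hlt r hr
        · intro k
          have h2 := IH2 k
          simp only [List.map_cons, List.mem_cons] at h2 ⊢
          tauto
        · intro pr hpr
          rcases List.mem_cons.mp hpr with rfl | hpr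
          · have hnil : (q :: t').filter (fun r => r.1 == s) = [] := by
              rw [List.filter_eq_nil_iff]
              intro r hr
              simp only [Bool.not_eq_true, beq_eq_false_iff_ne, ne_eq]
              exact fun h => absurd h (ne_of_gt (hlt r hr))
            have hfil : ((s, c) :: q :: t').filter (fun r => r.1 == s) = [(s, c)] := by
              rw [List.filter_cons, if_pos (by simp), hnil]
            show ([c] : List String)
              = (((s, c) :: q :: t').filter (fun r => r.1 == s)).map Prod.snd
            rw [hfil]
            rfl
          · have hprlt : s < pr.1 := by
              have h1 : pr.1 ∈ ((q.1, q.2 :: cs) :: gs).map Prod.fst := List.mem_map_of_mem hpr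
              have h2 : pr.1 ∈ (q :: t').map Prod.fst := (IH2 pr.1).mp h1
              obtain ⟨r, hr, hrb⟩ := List.mem_map.mp h2
              exact hrb ▸ hlt r hr
            have hv := IH3 pr (by rw [hshape]; exact hpr)
            rw [hv]
            simp only [List.filter_cons]
            have hne : ((s, c).1 == pr.1) = false := by
              simp only [beq_eq_false_iff_ne, ne_eq]
              exact ne_of_lt hprlt
            simp only [hne, Bool.false_eq_true, if_false]

-- the common normal form both results are proved equal to
def pvVal (xs : List (String × String)) (k : String) : List String :=
  PySem.List.sorted ((xs.filter (fun p => p.1 == k)).map Prod.snd) (fun c => c) false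

def pvN (xs : List (String × String)) : List (String × List String) :=
  (PySem.List.sorted (PySem.Set.ofList (xs.map Prod.fst)) (fun k => k) false).map
    (fun k => (k, pvVal xs k))

lemma pvSet_add_of_mem {s : PySem.Set String} {x : String} (h : x ∈ s) :
    PySem.Set.add s x = s := by
  simp [PySem.Set.add, PySem.Set.contains, h]

lemma pvSet_update_self : ∀ (l : List String) (s : PySem.Set String),
    (∀ x ∈ l, x ∈ s) → PySem.Set.update s l = s := by
  intro l
  induction l with
  | nil => intro s _; rfl
  | cons a t ih =>
    intro s h
    show PySem.Set.update (PySem.Set.add s a) t = s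
    rw [pvSet_add_of_mem (h a List.mem_cons_self)]
    exact ih s (fun x hx => h x (List.mem_cons_of_mem _ hx))

lemma pvGetD_foldl_sortvals : ∀ (ks : List String) (d : PySem.Dict String (List String)),
    ks.Nodup → ∀ k,
    (ks.foldl (fun d k => d.insert k (PySem.List.sorted (d.getD k []) (fun c => c) false)) d).getD k []
      = if k ∈ ks then PySem.List.sorted (d.getD k []) (fun c => c) false else d.getD k [] := by
  intro ks
  induction ks with
  | nil => intro d _ k; simp
  | cons a t ih =>
    intro d hnd k
    rw [List.nodup_cons] at hnd
    simp only [List.foldl_cons]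
    rw [ih _ hnd.2 k]
    by_cases hk : k = a
    · subst hk
      rw [if_neg (fun h => hnd.1 h), if_pos List.mem_cons_self, PySem.Dict.getD_insert_self]
    · rw [PySem.Dict.getD_insert_of_ne _ _ _ hk]
      by_cases hkt : k ∈ t
      · rw [if_pos hkt, if_pos (List.mem_cons_of_mem _ hkt)]
      · rw [if_neg hkt, if_neg (by simp [hk, hkt])]

lemma pvA_eq_N (xs : List (String × String)) : get_unique_seqs xs = pvN xs := by
  unfold get_unique_seqs
  -- the accumulation step is exactly d.modify p.1 [] (· ++ [p.2])
  have hstep : (fun (d : PySem.Dict String (List String)) (p : String × String) =>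
        let d' := if d.contains p.1 then d else d.insert p.1 ([] : List String)
        d'.insert p.1 (d'.getD p.1 [] ++ [p.2]))
      = (fun d p => d.modify p.1 [] (fun v => v ++ [p.2])) := by
    funext d p
    by_cases h : d.contains p.1 = true
    · simp only [h, if_true, PySem.Dict.modify]
    · simp only [h, Bool.false_eq_true, if_false, PySem.Dict.modify]
      rw [PySem.Dict.getD_insert_self, PySem.Dict.insert_insert_self,
        PySem.Dict.getD_of_not_contains _ _ (by simpa using h)]
  simp only [hstep]
  set d1 := xs.foldl (fun d p => d.modify p.1 [] (fun v => v ++ [p.2])) PySem.Dict.empty with hd1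
  have hgetD1 : ∀ k, d1.getD k [] = (xs.filter (fun p => p.1 == k)).map Prod.snd := by
    intro k
    rw [hd1]
    simpa using PySem.Dict.getD_foldl_modify_append xs PySem.Dict.empty k
  have hkeys1 : d1.keys = PySem.Set.ofList (xs.map Prod.fst) := by
    rw [hd1]
    have h := PySem.Dict.keys_foldl_modify_key xs Prod.fst ([] : List String)
      (fun _ p v => v ++ [p.2]) PySem.Dict.empty
    simpa [PySem.Dict.keys_empty, PySem.Set.update, ← PySem.Set.ofList_eq_foldl] using h
  have hnodup1 : d1.keys.Nodup := by
    rw [hd1]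
    exact PySem.Dict.nodup_keys_foldl_modify_key xs Prod.fst ([] : List String)
      (fun _ p v => v ++ [p.2]) PySem.Dict.empty PySem.Dict.nodup_keys_empty
  set d2 := d1.keys.foldl
      (fun d k => d.insert k (PySem.List.sorted (d.getD k []) (fun c => c) false)) d1 with hd2
  have hkeys2 : d2.keys = d1.keys := by
    rw [hd2, PySem.Dict.keys_foldl_insert]
    exact pvSet_update_self _ _ (fun x hx => hx)
  have hnodup2 : d2.keys.Nodup := by
    rw [hd2]
    exact PySem.Dict.nodup_keys_foldl_insert _ _ _ hnodup1
  have hitems : d2.items = d1.keys.map (fun k => (k, pvVal xs k)) := by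
    rw [PySem.Dict.items_eq_map_keys d2 hnodup2 [], hkeys2]
    refine List.map_congr_left ?_
    intro k hk
    rw [hd2, pvGetD_foldl_sortvals d1.keys d1 hnodup1 k, if_pos hk, hgetD1 k]
    rfl
  rw [hitems, hkeys1]
  refine PySem.List.sorted_eq_of_perm_of_pairwise_lt _ _ _ ?_ ?_
  · exact (PySem.List.sorted_perm _ _ _).map _
  · refine List.Pairwise.map _ (fun a b h => h) ?_
    exact PySem.List.sorted_ofList_pairwise_lt (xs := xs.map Prod.fst)

lemma pvB_eq_N (xs : List (String × String)) : get_unique_seqs_alt xs = pvN xs := by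
  unfold get_unique_seqs_alt
  set ys := PySem.List.sorted2 xs (fun p => p.1) (fun p => p.2) false with hys
  have hlex : List.Pairwise pvLexLe ys := pvSorted2_pairwise xs
  have hperm : ys.Perm xs := PySem.List.sorted2_perm xs _ _ false
  obtain ⟨P1, P2, P3⟩ := pvGroupRuns_spec ys hlex
  -- each group's chain list is exactly sorted(chains of that seq in xs)
  have hval : ∀ p ∈ pvGroupRuns ys, p.2 = pvVal xs p.1 := by
    intro p hp
    rw [P3 p hp]
    unfold pvVal
    refine (PySem.List.sorted_id_eq_of_perm_of_pairwise _ _ ?_ ?_).symm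
    · exact ((hperm.filter _).map _)
    · rw [List.pairwise_map]
      have hfil : List.Pairwise pvLexLe (ys.filter (fun q => q.1 == p.1)) :=
        List.Pairwise.sublist List.filter_sublist hlex
      refine List.Pairwise.imp_of_mem ?_ hfil
      intro a b ha hb hab
      have ha1 : a.1 = p.1 := by simpa using (List.mem_filter.mp ha).2
      have hb1 : b.1 = p.1 := by simpa using (List.mem_filter.mp hb).2
      rcases hab with h | ⟨_, h⟩
      · exact absurd (ha1 ▸ hb1 ▸ h) (lt_irrefl _)
      · exact h
  have hkeys : PySem.List.sorted (PySem.Set.ofList (xs.map Prod.fst)) (fun k => k) false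
      = (pvGroupRuns ys).map Prod.fst := by
    refine PySem.List.sorted_id_eq_of_perm_of_pairwise _ _ ?_ ?_
    · refine (List.perm_ext_iff_of_nodup ?_ (PySem.Set.nodup_ofList _)).mpr ?_
      · exact (List.pairwise_map.mpr P1).imp ne_of_lt
      · intro k
        rw [PySem.Set.mem_ofList, P2 k]
        exact (hperm.map Prod.fst).mem_iff
    · exact (List.pairwise_map.mpr P1).imp le_of_lt
  unfold pvN
  rw [hkeys, List.map_map]
  symm
  refine List.map_congr_left ?_ |>.trans (List.map_id _)
  intro p hp
  exact Prod.ext rfl (hval p hp).symm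


-- ===== VERDICT (by name: the statement is the Claim_ definition above) =====
theorem get_unique_seqs_spec : Claim_equal_get_unique_seqs := by
  intro xs _ _
  unfold Spec_get_unique_seqs
  rw [pvA_eq_N, pvB_eq_N]
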